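-- pv_equiv track=rewrite | github.com/LeeSinLiang/Janus | backend/src/agents/strategy_planner.py | _format_existing_posts
-- ===== SOURCE A (Python) =====
-- from typing import Dict, Any, List
--
-- def _format_existing_posts(existing_posts: List[Dict[str, Any]]) -> str:
--     """
--     Format existing posts into a readable text format for the prompt.
--
--     Args:
--         existing_posts: List of existing posts with metadata
--
--     Returns:
--         Formatted string representation of existing posts
--     """
--     if not existing_posts:
--         return "No existing posts."
--
--     # Group posts by phase
--     posts_by_phase = {}
--     for post in existing_posts:
--         phase = post.get('phase', 'Phase 1')
--         if phase not in posts_by_phase: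
--             posts_by_phase[phase] = []
--         posts_by_phase[phase].append(post)
--
--     # Format output
--     formatted_text = []
--     for phase in sorted(posts_by_phase.keys()):
--         formatted_text.append(f"\n{phase}:")
--         for post in posts_by_phase[phase]:
--             node_id = post.get('node_id', 'UNKNOWN')
--             title = post.get('title', 'Untitled')
--             description = post.get('description', 'No description')
--             formatted_text.append(f"  - {node_id}: {title}")
--             formatted_text.append(f"    Description: {description}")
--
--     return "\n".join(formatted_text)
-- ===== SOURCE B (Python) =====
-- def _format_existing_posts(existing_posts):
--     """Format existing posts: sorted distinct phases, then a filter pass per phase (no grouping dict)."""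
--     if not existing_posts:
--         return "No existing posts."
--     phases = sorted(set(post.get('phase', 'Phase 1') for post in existing_posts))
--     lines = []
--     for phase in phases:
--         lines.append(f"\n{phase}:")
--         for post in existing_posts:
--             if post.get('phase', 'Phase 1') == phase:
--                 lines.append(f"  - {post.get('node_id', 'UNKNOWN')}: {post.get('title', 'Untitled')}")
--                 lines.append(f"    Description: {post.get('description', 'No description')}")
--     return "\n".join(lines)
-- ===== Notes on version B (the rewrite author's own statement) =====
-- stated objective: alternative
-- what changed: B drops A's dict-of-lists grouping entirely: it sorts the distinct phase keys once and emits each phase's block by filtering the original list per phase in a nested pass.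
import Mathlib
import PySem

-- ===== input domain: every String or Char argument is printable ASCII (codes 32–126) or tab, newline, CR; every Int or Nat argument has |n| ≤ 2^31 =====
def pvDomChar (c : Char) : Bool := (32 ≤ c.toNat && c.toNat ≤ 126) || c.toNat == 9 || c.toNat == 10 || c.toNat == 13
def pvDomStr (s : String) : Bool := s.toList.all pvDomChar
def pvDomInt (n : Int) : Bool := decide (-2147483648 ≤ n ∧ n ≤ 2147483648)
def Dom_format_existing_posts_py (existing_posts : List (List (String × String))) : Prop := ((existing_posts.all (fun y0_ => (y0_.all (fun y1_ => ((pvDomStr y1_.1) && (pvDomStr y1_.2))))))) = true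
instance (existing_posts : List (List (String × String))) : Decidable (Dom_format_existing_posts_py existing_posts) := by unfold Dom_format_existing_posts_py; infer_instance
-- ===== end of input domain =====

-- B replaces A's dict-of-lists grouping by sorted distinct phase keys plus a per-phase filter pass (alternative decomposition, same result).

-- shared field accessors (post.get(k, default) on the post dict)
def pvPhase (post : List (String × String)) : String :=
  (PySem.Dict.mk post).getD "phase" "Phase 1"
def pvLine1 (post : List (String × String)) : String :=
  "  - " ++ (PySem.Dict.mk post).getD "node_id" "UNKNOWN" ++ ": " ++ (PySem.Dict.mk post).getD "title" "Untitled"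
def pvLine2 (post : List (String × String)) : String :=
  "    Description: " ++ (PySem.Dict.mk post).getD "description" "No description"

-- ===== PORT A =====
def format_existing_posts_py (existing_posts : List (List (String × String))) : String :=
  if existing_posts = [] then "No existing posts." else
  -- posts_by_phase: 'if phase not in d: d[phase] = []' then 'd[phase].append(post)' = modify
  let posts_by_phase : PySem.Dict String (List (List (String × String))) :=
    existing_posts.foldl (fun d post => d.modify (pvPhase post) [] (· ++ [post])) PySem.Dict.empty
  let formatted_text :=
    (PySem.List.sorted posts_by_phase.keys (fun x => x) false).foldl (fun acc phase =>
      (posts_by_phase.getD phase []).foldl (fun acc post =>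
        (acc ++ [pvLine1 post]) ++ [pvLine2 post])
        (acc ++ ["\n" ++ phase ++ ":"])) []
  PySem.Str.join "\n" formatted_text

-- ===== PORT B =====
def format_existing_posts_py_alt (existing_posts : List (List (String × String))) : String :=
  if existing_posts = [] then "No existing posts." else
  let phases := PySem.List.sorted (PySem.Set.ofList (existing_posts.map pvPhase)) (fun x => x) false
  let lines :=
    phases.foldl (fun acc phase =>
      existing_posts.foldl (fun acc post =>
        if pvPhase post == phase then acc ++ [pvLine1 post, pvLine2 post] else acc)
        (acc ++ ["\n" ++ phase ++ ":"])) []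
  PySem.Str.join "\n" lines

-- ===== PRECONDITION & SPEC =====
def Spec_format_existing_posts_py (existing_posts : List (List (String × String))) (out : String) : Prop := out = format_existing_posts_py_alt existing_posts
instance (existing_posts : List (List (String × String))) (out : String) : Decidable (Spec_format_existing_posts_py existing_posts out) := by unfold Spec_format_existing_posts_py; infer_instance

-- ===== CLAIM (what is proved, stated in full; the proofs are below) =====
def Claim_equal_format_existing_posts_py : Prop := ∀ (existing_posts : List (List (String × String))), Dom_format_existing_posts_py existing_posts → Spec_format_existing_posts_py existing_posts (format_existing_posts_py existing_posts)

-- ===== LEMMAS AND PROOFS =====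

-- a guarded accumulate loop is the same loop over the filtered list
theorem foldl_ite_filter {α β : Type} (p : α → Bool) (g : β → α → β) :
    ∀ (l : List α) (a : β),
      l.foldl (fun acc x => if p x then g acc x else acc) a = (l.filter p).foldl g a := by
  intro l
  induction l with
  | nil => intro a; rfl
  | cons x xs ih =>
    intro a
    by_cases h : p x = true <;> simp [List.filter, h, ih]

-- the grouping dict's keys are the distinct phases in first-occurrence order
theorem keys_group (posts : List (List (String × String))) :
    (posts.foldl (fun d post => d.modify (pvPhase post) [] (· ++ [post]))
      (PySem.Dict.empty : PySem.Dict String (List (List (String × String))))).keys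
      = PySem.Set.ofList (posts.map pvPhase) := by
  rw [PySem.Dict.keys_foldl_modify_key]
  rfl

-- the grouping dict's entry at a phase is the filtered sublist
theorem getD_group (posts : List (List (String × String))) (c : String) :
    (posts.foldl (fun d post => d.modify (pvPhase post) [] (· ++ [post]))
      (PySem.Dict.empty : PySem.Dict String (List (List (String × String))))).getD c []
      = posts.filter (fun post => pvPhase post == c) := by
  have h := PySem.Dict.getD_foldl_modify_append
    (l := posts.map (fun post => (pvPhase post, post)))
    (d := (PySem.Dict.empty : PySem.Dict String (List (List (String × String))))) (c := c)
  simpa [List.foldl_map, List.filter_map, List.map_map, Function.comp_def] using h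

-- ===== VERDICT (by name: the statement is the Claim_ definition above) =====
theorem format_existing_posts_py_spec : Claim_equal_format_existing_posts_py := by
  intro posts _
  unfold Spec_format_existing_posts_py format_existing_posts_py format_existing_posts_py_alt
  by_cases hnil : posts = []
  · simp [hnil]
  · simp only [if_neg hnil, keys_group]
    congr 1
    apply List.foldl_ext
    intro acc phase _
    rw [foldl_ite_filter, getD_group]
    apply List.foldl_ext
    intro acc' post _
    simp
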